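-- pv_equiv track=rewrite | github.com/kopalgarg/leetcode-practice | arrays-101/replaceWithGreatestToRight.py | replaceElements1
-- ===== SOURCE A (Python) =====
-- from typing import List
--
-- def replaceElements1(arr: List[int]) -> List[int]:
--     if len(arr) == 1:
--         arr[0] = -1
--     else:
--         for i in range(len(arr)):
--             curMax = -1
--             # find max element from i+1 to end of array
--             for j in range(i+1, len(arr)):
--                 if arr[j] > curMax:
--                     curMax = arr[j]
--             # replace ith element with curMax
--             arr[i] = curMax
--
--     return arr
-- ===== SOURCE B (Python) =====
-- from typing import List
--
-- def replaceElements1(arr: List[int]) -> List[int]: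
--     m = -1
--     for i in range(len(arr) - 1, -1, -1):
--         arr[i], m = m, max(m, arr[i])
--     return arr
-- ===== Notes on version B (the rewrite author's own statement) =====
-- stated objective: faster
-- what changed: Replaced the nested rescan of the suffix for every index by one right-to-left pass that carries the running suffix maximum.
import Mathlib
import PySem

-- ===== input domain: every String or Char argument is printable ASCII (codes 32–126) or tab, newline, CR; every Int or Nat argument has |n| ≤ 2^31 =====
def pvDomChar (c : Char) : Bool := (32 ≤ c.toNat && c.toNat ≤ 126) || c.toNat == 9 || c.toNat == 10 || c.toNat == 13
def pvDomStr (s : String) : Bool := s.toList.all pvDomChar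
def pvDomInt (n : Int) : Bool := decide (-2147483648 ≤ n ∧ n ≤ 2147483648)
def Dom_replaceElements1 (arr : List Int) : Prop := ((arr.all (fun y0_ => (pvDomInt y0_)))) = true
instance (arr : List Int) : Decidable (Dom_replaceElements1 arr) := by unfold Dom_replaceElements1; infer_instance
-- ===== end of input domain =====

-- B replaces A's nested rescan of each suffix by one right-to-left pass carrying the running
-- suffix maximum (faster; both versions overwrite arr element-wise in place, the proof is about
-- the return value).

-- ===== PORT A =====
-- literal transliteration of A: special case len==1, else for each i scan arr[i+1:] for the max
def replaceElements1 (arr : List Int) : List Int :=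
  if arr.length == 1 then
    PySem.List.pySetD arr 0 (-1)
  else
    (PySem.List.pyRange 0 arr.length 1).foldl
      (fun a i =>
        let curMax :=
          (PySem.List.pyRange (i + 1) a.length 1).foldl
            (fun c j => if PySem.List.pyGetD a j 0 > c then PySem.List.pyGetD a j 0 else c) (-1)
        PySem.List.pySetD a i curMax)
      arr

-- ===== PORT B =====
-- B's right-to-left loop with running maximum m, as the obvious structural recursion over the
-- same state: first component is m after processing the suffix, second the rewritten suffix.
def replAux (l : List Int) : Int × List Int :=
  match l with
  | [] => (-1, [])
  | x :: xs =>
    let p := replAux xs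
    (max p.1 x, p.1 :: p.2)

def replaceElements1_alt (arr : List Int) : List Int := (replAux arr).2

-- ===== PRECONDITION & SPEC =====
def Spec_replaceElements1 (arr : List Int) (out : List Int) : Prop := out = replaceElements1_alt arr
instance (arr : List Int) (out : List Int) : Decidable (Spec_replaceElements1 arr out) := by unfold Spec_replaceElements1; infer_instance

-- ===== CLAIM (what is proved, stated in full; the proofs are below) =====
def Claim_equal_replaceElements1 : Prop := ∀ (arr : List Int), Dom_replaceElements1 arr → Spec_replaceElements1 arr (replaceElements1 arr)

-- ===== LEMMAS AND PROOFS =====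

theorem replAux_length (l : List Int) : (replAux l).2.length = l.length := by
  induction l with
  | nil => rfl
  | cons x xs ih => simp [replAux, ih]

theorem foldl_max_max (l : List Int) (c d : Int) :
    l.foldl max (max c d) = max c (l.foldl max d) := by
  induction l generalizing c d with
  | nil => simp
  | cons x xs ih =>
    simp only [List.foldl_cons]
    rw [max_assoc, ih]

theorem foldl_max_eq_replAux_fst (l : List Int) :
    l.foldl max (-1) = (replAux l).1 := by
  induction l with
  | nil => rfl
  | cons x xs ih =>
    simp only [List.foldl_cons, replAux]
    rw [max_comm (-1) x, foldl_max_max, ih, max_comm]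

theorem replAux_getElem (l : List Int) (k : Nat) (hk : k < l.length) :
    (replAux l).2[k]'(by rw [replAux_length]; exact hk) = (replAux (l.drop (k + 1))).1 := by
  induction l generalizing k with
  | nil => simp at hk
  | cons x xs ih =>
    cases k with
    | zero => simp [replAux]
    | succ k =>
      simp only [replAux, List.getElem_cons_succ, List.drop_succ_cons]
      exact ih k (by simpa using hk)

theorem if_gt_eq_max (c x : Int) : (if x > c then x else c) = max c x := by
  rcases le_or_gt x c with h | h
  · rw [max_eq_left h, if_neg (not_lt.mpr h)]
  · rw [max_eq_right h.le, if_pos h]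

-- the loop invariant: after the first k outer iterations the list is
-- (first k suffix-maxima) ++ (untouched tail of arr)
theorem outer_invariant (arr : List Int) (k : Nat) (hk : k ≤ arr.length) :
    (PySem.List.pyRange 0 (k : Int) 1).foldl
      (fun a i =>
        let curMax :=
          (PySem.List.pyRange (i + 1) a.length 1).foldl
            (fun c j => if PySem.List.pyGetD a j 0 > c then PySem.List.pyGetD a j 0 else c) (-1)
        PySem.List.pySetD a i curMax)
      arr
    = (replAux arr).2.take k ++ arr.drop k := by
  induction k with
  | zero => simp
  | succ k ih =>
    have hk' : k ≤ arr.length := Nat.le_of_succ_le hk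
    have hklt : k < arr.length := hk
    push_cast
    rw [PySem.List.pyRange_one_succ_right (by positivity), List.foldl_append, ih hk']
    set a : List Int := (replAux arr).2.take k ++ arr.drop k with ha
    have hlen : a.length = arr.length := by
      simp [ha, replAux_length, Nat.min_eq_left hk']
      omega
    have htake : ((replAux arr).2.take k).length = k := by
      simp [replAux_length, Nat.min_eq_left hk']
    simp only [List.foldl_cons, List.foldl_nil]
    -- the inner scan of a[k+1:] is the fold of max over arr.drop (k+1)
    have hdrop : a.drop (k + 1) = arr.drop (k + 1) := by
      rw [ha, List.drop_append, htake,
        List.drop_eq_nil_of_le (by rw [htake]; omega), List.nil_append, List.drop_drop]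
      congr 1
      omega
    have hfun : (fun (c j : Int) => if PySem.List.pyGetD a j 0 > c then PySem.List.pyGetD a j 0 else c)
        = fun c j => max c (PySem.List.pyGetD a j 0) := by
      funext c j; exact if_gt_eq_max c _
    have hinner :
        (PySem.List.pyRange ((k : Int) + 1) a.length 1).foldl
          (fun c j => if PySem.List.pyGetD a j 0 > c then PySem.List.pyGetD a j 0 else c) (-1)
        = (replAux (arr.drop (k + 1))).1 := by
      rw [hfun]
      have h0 : (0 : Int) ≤ (k : Int) + 1 := by positivity
      have := PySem.List.foldl_pyRange_pyGetD' (xs := a) (d := 0) (f := fun c x => max c x)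
        (init := -1) (a := (k : Int) + 1) h0
      rw [hlen] at this ⊢
      rw [this]
      have : (((k : Int) + 1).toNat) = k + 1 := by omega
      rw [this, hdrop, foldl_max_eq_replAux_fst]
    rw [hinner]
    -- the write a[k] := curMax extends the rewritten prefix by one
    have hset : PySem.List.pySetD a (k : Int) ((replAux (arr.drop (k + 1))).1)
        = (replAux arr).2.take (k + 1) ++ arr.drop (k + 1) := by
      rw [PySem.List.pySetD_natCast]
      have hkd : k < (replAux arr).2.length := by rw [replAux_length]; exact hklt
      rw [ha, List.set_append]
      rw [htake]
      simp only [Nat.lt_irrefl, Nat.sub_self]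
      have hdk : arr.drop k = arr[k] :: arr.drop (k + 1) := List.drop_eq_getElem_cons hklt
      rw [List.take_add_one, List.getElem?_eq_getElem hkd, replAux_getElem arr k hklt]
      rw [hdk, List.set_cons_zero]
      simp
    rw [hset]

-- ===== VERDICT (by name: the statement is the Claim_ definition above) =====
theorem replaceElements1_spec : Claim_equal_replaceElements1 := by
  intro arr _
  unfold Spec_replaceElements1 replaceElements1
  split
  · rename_i h
    match arr, h with
    | [x], _ => rfl
  · have := outer_invariant arr arr.length le_rfl
    rw [this]
    simp [replaceElements1_alt, replAux_length]
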